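-- pv_equiv track=rewrite | github.com/mksanjeewa86/MiraiWorks | backend/app/tests/test_recruitment_workflow_simple.py | _calculate_paths
-- ===== SOURCE A (Python) =====
-- def _calculate_paths(start_node: int, connections: list) -> list:
--     """Helper to calculate workflow paths"""
--     # Build adjacency list
--     graph = {}
--     for conn in connections:
--         if conn["source"] not in graph:
--             graph[conn["source"]] = []
--         graph[conn["source"]].append(conn["target"])
--
--     paths = []
--
--     def dfs(node: int, path: list, visited: set):
--         if node in visited:
--             return  # Cycle detection
--
--         visited.add(node)
--         path.append(node)
--
--         if node not in graph:
--             # End node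
--             paths.append(path.copy())
--         else:
--             for next_node in graph[node]:
--                 dfs(next_node, path, visited.copy())
--
--         path.pop()
--
--     dfs(start_node, [], set())
--     return paths
-- ===== SOURCE B (Python) =====
-- def _calculate_paths(start_node: int, connections: list) -> list:
--     """Edge-list suffix recursion: no adjacency dict, paths built back-to-front."""
--     edges = [(c["source"], c["target"]) for c in connections]
--     sources = frozenset(s for s, _ in edges)
--
--     def suffixes(node, visited):
--         if node in visited:
--             return []
--         if node not in sources:
--             return [[node]]
--         vis = visited | {node}
--         return [[node] + rest
--                 for s, t in edges if s == node
--                 for rest in suffixes(t, vis)]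
--
--     return suffixes(start_node, frozenset())
-- ===== Notes on version B (the rewrite author's own statement) =====
-- stated objective: alternative
-- what changed: Drops A's adjacency dict and prefix-accumulating recursive DFS entirely: B scans a plain edge list ((source,target) pairs) with one frozenset of sources, and a suffix recursion returns the list of path suffixes from each node, building every path back-to-front by prepending the node, so no path accumulator and no dict are maintained.
import Mathlib
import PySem

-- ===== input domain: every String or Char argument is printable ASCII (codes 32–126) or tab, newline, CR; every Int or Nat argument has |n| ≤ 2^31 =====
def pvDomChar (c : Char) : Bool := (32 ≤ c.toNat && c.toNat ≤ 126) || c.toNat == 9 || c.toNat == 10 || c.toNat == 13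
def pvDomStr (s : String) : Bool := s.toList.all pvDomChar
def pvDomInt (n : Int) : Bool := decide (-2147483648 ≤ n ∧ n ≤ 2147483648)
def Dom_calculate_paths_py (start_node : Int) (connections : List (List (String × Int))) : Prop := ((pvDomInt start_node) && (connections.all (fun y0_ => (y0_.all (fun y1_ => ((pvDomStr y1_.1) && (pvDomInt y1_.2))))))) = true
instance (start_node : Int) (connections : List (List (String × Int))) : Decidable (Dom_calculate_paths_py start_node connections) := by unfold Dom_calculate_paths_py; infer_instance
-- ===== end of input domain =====

-- B replaces A's adjacency-dict + prefix-accumulating recursive DFS by a dict-free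
-- edge-list recursion that returns path suffixes and builds each path back-to-front;
-- objective: alternative decomposition, same asymptotic cost.

-- ===== PORT A =====

-- conn["source"] / conn["target"]; the 0 default is never used under Pre_ (KeyError excluded there)
def pvConnSrc (conn : List (String × Int)) : Int := (PySem.Dict.get? (PySem.Dict.mk conn) "source").getD 0
def pvConnTgt (conn : List (String × Int)) : Int := (PySem.Dict.get? (PySem.Dict.mk conn) "target").getD 0

-- A's adjacency build: if s not in graph: graph[s] = []; graph[s].append(t)
def pvAddEdgeA (g : PySem.Dict Int (List Int)) (conn : List (String × Int)) : PySem.Dict Int (List Int) :=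
  let g1 := if g.contains (pvConnSrc conn) then g else g.insert (pvConnSrc conn) []
  g1.modify (pvConnSrc conn) [] (fun l => l ++ [pvConnTgt conn])

def pvGraphA (connections : List (List (String × Int))) : PySem.Dict Int (List Int) :=
  connections.foldl pvAddEdgeA PySem.Dict.empty

-- fuel guard only: number of distinct candidate nodes + 1 bounds the recursion depth
-- (visited grows by one node per level), so the 0 branch is never reached in Python
def pvFuelA (start_node : Int) (connections : List (List (String × Int))) : Nat :=
  (insert start_node (connections.map pvConnTgt).toFinset).card + 1

-- A's recursive dfs(node, path, visited); visited.copy()/path append+pop are value passing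
def pvDfsA (graph : PySem.Dict Int (List Int)) : Nat → Int → List Int → PySem.Set Int → List (List Int)
  | 0, _, _, _ => []
  | fuel+1, node, path, visited =>
    if PySem.Set.contains visited node then []
    else
      let visited' := PySem.Set.add visited node
      let path' := path ++ [node]
      match PySem.Dict.get? graph node with
      | none => [path']
      | some nbrs => nbrs.foldl (fun acc nx => acc ++ pvDfsA graph fuel nx path' visited') []

def calculate_paths_py (start_node : Int) (connections : List (List (String × Int))) : List (List Int) :=
  pvDfsA (pvGraphA connections) (pvFuelA start_node connections) start_node [] PySem.Set.empty

-- ===== PORT B =====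

-- edges = [(c["source"], c["target"]) for c in connections]
def pvEdgesB (connections : List (List (String × Int))) : List (Int × Int) :=
  connections.map (fun c =>
    ((PySem.Dict.get? (PySem.Dict.mk c) "source").getD 0,
     (PySem.Dict.get? (PySem.Dict.mk c) "target").getD 0))

-- sources = frozenset(s for s, _ in edges)
def pvSourcesB (edges : List (Int × Int)) : PySem.Set Int :=
  PySem.Set.ofList (edges.map Prod.fst)

-- fuel guard only (same bound as A's, never reached in Python): |visited| grows each level
def pvFuelB (start_node : Int) (connections : List (List (String × Int))) : Nat :=
  (insert start_node ((pvEdgesB connections).map Prod.snd).toFinset).card + 1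

-- suffixes(node, visited): list of path suffixes starting at node; paths built back-to-front
def pvSufB (edges : List (Int × Int)) (sources : PySem.Set Int) :
    Nat → Int → PySem.Set Int → List (List Int)
  | 0, _, _ => []
  | fuel+1, node, visited =>
    if PySem.Set.contains visited node then []
    else if ¬ PySem.Set.contains sources node then [[node]]
    else
      let vis := PySem.Set.add visited node
      edges.flatMap (fun e =>
        if e.1 = node then (pvSufB edges sources fuel e.2 vis).map (fun rest => node :: rest)
        else [])

def calculate_paths_py_alt (start_node : Int) (connections : List (List (String × Int))) : List (List Int) :=
  let edges := pvEdgesB connections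
  pvSufB edges (pvSourcesB edges) (pvFuelB start_node connections) start_node PySem.Set.empty

-- ===== PRECONDITION & SPEC =====

-- Pre_ excludes exactly the inputs where A raises KeyError: a connection dict
-- missing the "source" or "target" key (B raises there too).
def Pre_calculate_paths_py (start_node : Int) (connections : List (List (String × Int))) : Prop :=
  ∀ conn ∈ connections,
    (PySem.Dict.get? (PySem.Dict.mk conn) "source").isSome = true ∧
    (PySem.Dict.get? (PySem.Dict.mk conn) "target").isSome = true

instance (start_node : Int) (connections : List (List (String × Int))) : Decidable (Pre_calculate_paths_py start_node connections) := by unfold Pre_calculate_paths_py; infer_instance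

def pvWitness_calculate_paths_py : Int × (List (List (String × Int))) :=
  (0, [[("source", 0), ("target", 1)], [("source", 1), ("target", 2)]])

def Spec_calculate_paths_py (start_node : Int) (connections : List (List (String × Int))) (out : List (List Int)) : Prop := out = calculate_paths_py_alt start_node connections
instance (start_node : Int) (connections : List (List (String × Int))) (out : List (List Int)) : Decidable (Spec_calculate_paths_py start_node connections out) := by unfold Spec_calculate_paths_py; infer_instance

-- ===== CLAIM (what is proved, stated in full; the proofs are below) =====
def Claim_equal_calculate_paths_py : Prop := ∀ (start_node : Int) (connections : List (List (String × Int))), Dom_calculate_paths_py start_node connections → Pre_calculate_paths_py start_node connections → Spec_calculate_paths_py start_node connections (calculate_paths_py start_node connections)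

-- ===== LEMMAS AND PROOFS =====

-- A's guarded insert-then-append step is one dict modify
lemma pvAddEdgeA_eq_modify (g : PySem.Dict Int (List Int)) (conn : List (String × Int)) :
    pvAddEdgeA g conn = g.modify (pvConnSrc conn) [] (fun l => l ++ [pvConnTgt conn]) := by
  unfold pvAddEdgeA
  by_cases hc : g.contains (pvConnSrc conn)
  · simp [hc]
  · have hn : PySem.Dict.get? g (pvConnSrc conn) = none := by
      have h := PySem.Dict.contains_eq_isSome_get? (d := g) (k := pvConnSrc conn)
      exact Option.not_isSome_iff_eq_none.mp (by rw [← h]; simpa using hc)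
    simp [hc, PySem.Dict.modify, PySem.Dict.getD_eq_get?_getD,
      PySem.Dict.get?_insert_self, hn, PySem.Dict.insert_insert_self]

-- edges of the connection list, via A-side field names (defeq to pvEdgesB)
lemma pvEdgesB_eq (connections : List (List (String × Int))) :
    pvEdgesB connections = connections.map (fun conn => (pvConnSrc conn, pvConnTgt conn)) := rfl

-- characterisation of A's adjacency dict: lookup = source membership + in-order targets
lemma pvGraphA_get? (connections : List (List (String × Int))) (n : Int) :
    PySem.Dict.get? (pvGraphA connections) n =
      if PySem.Set.contains (pvSourcesB (pvEdgesB connections)) n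
      then some (((pvEdgesB connections).filter (fun e => e.1 == n)).map (fun e => e.2))
      else none := by
  have hfold : pvGraphA connections =
      (pvEdgesB connections).foldl (fun d p => d.modify p.1 [] (fun l => l ++ [p.2]))
        PySem.Dict.empty := by
    have hA : pvAddEdgeA =
        fun d conn => d.modify (pvConnSrc conn) [] (fun l => l ++ [pvConnTgt conn]) :=
      funext fun d => funext fun conn => pvAddEdgeA_eq_modify d conn
    unfold pvGraphA
    rw [hA, pvEdgesB_eq, List.foldl_map]
  have hkeys : (pvGraphA connections).keys = PySem.Set.ofList ((pvEdgesB connections).map Prod.fst) := by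
    rw [hfold, PySem.Dict.keys_foldl_modify_key (pvEdgesB connections) Prod.fst []
      (fun _ p => fun l => l ++ [p.2]) PySem.Dict.empty, PySem.Dict.keys_empty,
      PySem.Set.update_nil_left]
  have hmem : PySem.Set.contains (pvSourcesB (pvEdgesB connections)) n = true ↔
      n ∈ (pvGraphA connections).keys := by
    rw [hkeys]
    exact PySem.Set.contains_iff _ _
  by_cases h : PySem.Set.contains (pvSourcesB (pvEdgesB connections)) n
  · rw [if_pos h]
    have hk : n ∈ (pvGraphA connections).keys := hmem.mp h
    have hne : PySem.Dict.get? (pvGraphA connections) n ≠ none := by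
      rw [ne_eq, PySem.Dict.get?_eq_none_iff_not_mem_keys]
      simpa using hk
    obtain ⟨v, hv⟩ := Option.ne_none_iff_exists'.mp hne
    have hgd : (pvGraphA connections).getD n [] = v := PySem.Dict.getD_of_get?_eq_some _ _ hv
    have hval : (pvGraphA connections).getD n [] =
        ((pvEdgesB connections).filter (fun e => e.1 == n)).map (fun e => e.2) := by
      rw [hfold, PySem.Dict.getD_foldl_modify_append]
      simp
    rw [hv, ← hgd, hval]
  · rw [if_neg h]
    rw [PySem.Dict.get?_eq_none_iff_not_mem_keys]
    intro hk
    exact h (hmem.mpr hk)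

-- flatMap over a filtered list = flatMap with the guard inlined
lemma pvFlatMap_filter {α β : Type} (p : α → Bool) (h : α → List β) :
    ∀ l : List α, (l.filter p).flatMap h = l.flatMap (fun x => if p x then h x else []) := by
  intro l
  induction l with
  | nil => rfl
  | cons x xs ih =>
    by_cases hp : p x <;> simp [hp, ih]

-- the heart: A's prefix-accumulating dfs = B's suffix recursion, mapped under (path ++ ·)
lemma pvDfs_eq_suf (graph : PySem.Dict Int (List Int)) (edges : List (Int × Int))
    (sources : PySem.Set Int)
    (Hg : ∀ n, PySem.Dict.get? graph n =
      if PySem.Set.contains sources n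
      then some ((edges.filter (fun e => e.1 == n)).map (fun e => e.2)) else none) :
    ∀ (f : Nat) (n : Int) (p : List Int) (v : PySem.Set Int),
      pvDfsA graph f n p v = (pvSufB edges sources f n v).map (fun r => p ++ r) := by
  intro f
  induction f with
  | zero => intro n p v; rfl
  | succ f ih =>
    intro n p v
    simp only [pvDfsA, pvSufB]
    rw [Hg n]
    by_cases hv : PySem.Set.contains v n = true
    · rw [if_pos hv, if_pos hv]
      simp
    · rw [if_neg hv, if_neg hv]
      by_cases hs : PySem.Set.contains sources n = true
      · rw [if_pos hs, if_neg (not_not_intro hs)]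
        have hpt : ∀ e : Int × Int,
            (if (e.1 == n) = true then pvDfsA graph f e.2 (p ++ [n]) (PySem.Set.add v n) else [])
              = List.map (fun r => p ++ r)
                (if e.1 = n
                 then (pvSufB edges sources f e.2 (PySem.Set.add v n)).map (fun rest => n :: rest)
                 else []) := by
          intro e
          by_cases he : e.1 = n
          · rw [if_pos (by simpa using he), if_pos he, ih, List.map_map]
            apply List.map_congr_left
            intro r _
            simp
          · rw [if_neg (by simpa using he), if_neg he]
            rfl
        dsimp only
        rw [PySem.List.foldl_append_eq_flatMap, List.nil_append, List.flatMap_map,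
          pvFlatMap_filter, List.map_flatMap]
        exact congrArg (fun F => List.flatMap F edges) (funext hpt)
      · rw [if_neg hs, if_pos hs]
        simp

-- ===== VERDICT (by name: the statement is the Claim_ definition above) =====
theorem calculate_paths_py_spec : Claim_equal_calculate_paths_py := by
  intro start c _hdom _hpre
  unfold Spec_calculate_paths_py calculate_paths_py calculate_paths_py_alt
  have hfuel : pvFuelA start c = pvFuelB start c := by
    unfold pvFuelA pvFuelB
    rw [pvEdgesB_eq, List.map_map]
    rfl
  rw [hfuel]
  rw [pvDfs_eq_suf (pvGraphA c) (pvEdgesB c) (pvSourcesB (pvEdgesB c)) (pvGraphA_get? c)]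
  simp
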